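-- pv_equiv track=rewrite | github.com/mohammadfaiizan/ProjectI | DSA/Problem/Graph/03_Breadth_First_Search_BFS/1306_Jump_Game_III.py | canReach_approach4_optimized_early_termination
-- ===== SOURCE A (Python) =====
-- from typing import List
-- from collections import deque
--
-- def canReach_approach4_optimized_early_termination(arr: List[int], start: int) -> bool:
--     """
--     Approach 4: Optimized with Early Termination
--
--     Add optimizations for better average case performance.
--
--     Time: O(N)
--     Space: O(N)
--     """
--     if not arr or start >= len(arr):
--         return False
--
--     n = len(arr)
--
--     # Early check
--     if arr[start] == 0:
--         return True
--
--     # Quick scan for zeros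
--     zero_positions = set()
--     for i, val in enumerate(arr):
--         if val == 0:
--             zero_positions.add(i)
--
--     if not zero_positions:
--         return False
--
--     queue = deque([start])
--     visited = {start}
--
--     while queue:
--         current = queue.popleft()
--
--         # Try both directions
--         for next_pos in [current + arr[current], current - arr[current]]:
--             if 0 <= next_pos < n and next_pos not in visited:
--                 if next_pos in zero_positions:
--                     return True
--
--                 visited.add(next_pos)
--                 queue.append(next_pos)
--
--     return False
-- ===== SOURCE B (Python) =====
-- from typing import List
--
-- def canReach_approach4_optimized_early_termination(arr: List[int], start: int) -> bool:
--     # Bellman-Ford-style saturation over a boolean table instead of a queue/visited BFS.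
--     if not arr or start >= len(arr):
--         return False
--     if arr[start] == 0:
--         return True
--     n = len(arr)
--     reach = [False] * n
--     a = arr[start]
--     for p in (start + a, start - a):
--         if 0 <= p < n:
--             reach[p] = True
--     changed = True
--     while changed:
--         changed = False
--         for i in range(n):
--             if reach[i]:
--                 for j in (i + arr[i], i - arr[i]):
--                     if 0 <= j < n and not reach[j]:
--                         reach[j] = True
--                         changed = True
--     return any(reach[i] and arr[i] == 0 for i in range(n))
-- ===== Notes on version B (the rewrite author's own statement) =====
-- stated objective: alternative
-- what changed: Replaces the queue/visited BFS (with precomputed zero-position set) by a Bellman-Ford-style saturation: seed a boolean table with the two jump targets of start, repeatedly relax every marked index until a fixpoint, then scan the table for a marked zero.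
import Mathlib
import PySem

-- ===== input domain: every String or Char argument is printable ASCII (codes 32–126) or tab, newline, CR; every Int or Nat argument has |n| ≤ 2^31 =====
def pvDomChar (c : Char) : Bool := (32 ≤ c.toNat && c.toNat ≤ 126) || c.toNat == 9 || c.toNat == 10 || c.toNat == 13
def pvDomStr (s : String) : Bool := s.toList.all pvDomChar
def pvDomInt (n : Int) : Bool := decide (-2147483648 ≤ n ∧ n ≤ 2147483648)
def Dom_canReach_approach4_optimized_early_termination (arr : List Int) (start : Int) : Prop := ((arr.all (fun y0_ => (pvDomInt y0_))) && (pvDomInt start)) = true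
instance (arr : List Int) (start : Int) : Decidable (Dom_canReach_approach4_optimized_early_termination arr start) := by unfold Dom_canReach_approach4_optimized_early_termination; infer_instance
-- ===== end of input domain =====

-- B replaces A's queue/visited BFS by a boolean-table saturation (fixpoint relaxation); an alternative algorithm of the same result, not claimed faster.


-- ===== PORT A =====
-- zero_positions = {i for i, val in enumerate(arr) if val == 0}
def pvZeroPositions (arr : List Int) : PySem.Set Int :=
  (PySem.List.enumerate arr).foldl
    (fun s p => if p.2 = 0 then PySem.Set.add s p.1 else s) PySem.Set.empty

-- inner 'for next_pos in [current + arr[current], current - arr[current]]' body of A's BFS loop;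
-- none = the 'return True' early exit, some = the updated (visited, queue)
def pvTryNexts (arr : List Int) (zeros : PySem.Set Int) :
    List Int → PySem.Set Int → List Int → Option (PySem.Set Int × List Int)
  | [], visited, queue => some (visited, queue)
  | p :: rest, visited, queue =>
    if 0 ≤ p ∧ p < (arr.length : Int) ∧ p ∉ visited then
      if p ∈ zeros then none
      else pvTryNexts arr zeros rest (PySem.Set.add visited p) (queue ++ [p])
    else pvTryNexts arr zeros rest visited queue

-- the 'while queue:' loop; fueled (2*len(arr)+3 steps are proved sufficient below)
def pvBfs (arr : List Int) (zeros : PySem.Set Int) :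
    Nat → List Int → PySem.Set Int → Bool
  | 0, _, _ => false
  | _ + 1, [], _ => false
  | fuel + 1, current :: qs, visited =>
    match PySem.List.pyGet? arr current with
    | none => false  -- unreachable: every queued position indexes arr
    | some a =>
      match pvTryNexts arr zeros [current + a, current - a] visited qs with
      | none => true
      | some (v', q') => pvBfs arr zeros fuel q' v'

def canReach_approach4_optimized_early_termination (arr : List Int) (start : Int) : Bool :=
  if arr = [] ∨ (arr.length : Int) ≤ start then false
  else
    match PySem.List.pyGet? arr start with
    | none => false  -- Python raises IndexError here (start < -len(arr)); outside Pre_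
    | some a0 =>
      if a0 = 0 then true
      else
        let zeros := pvZeroPositions arr
        if zeros = [] then false
        else pvBfs arr zeros (2 * arr.length + 3) [start] (PySem.Set.ofList [start])

-- ===== PORT B =====
-- 'if 0 <= j < n and not reach[j]: reach[j] = True; changed = True'
def pvRelax (arr : List Int) (rc : List Bool × Bool) (j : Int) : List Bool × Bool :=
  if 0 ≤ j ∧ j < (arr.length : Int) ∧ PySem.List.pyGetD rc.1 j false = false then
    (PySem.List.pySetD rc.1 j true, true)
  else rc

-- body of 'for i in range(n):' in one relaxation round
def pvRoundBody (arr : List Int) (rc : List Bool × Bool) (i : Int) : List Bool × Bool :=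
  if PySem.List.pyGetD rc.1 i false then
    match PySem.List.pyGet? arr i with
    | none => rc  -- unreachable: i ∈ range(len(arr))
    | some a => [i + a, i - a].foldl (pvRelax arr) rc
  else rc

-- one round of 'changed = False; for i in range(n): ...'
def pvRound (arr : List Int) (reach : List Bool) (changed : Bool) : List Bool × Bool :=
  (PySem.List.pyRange 0 (arr.length : Int) 1).foldl (pvRoundBody arr) (reach, changed)

-- the 'while changed:' loop; fueled (len(arr)+1 rounds are proved sufficient below)
def pvSat (arr : List Int) : Nat → List Bool → List Bool
  | 0, reach => reach
  | fuel + 1, reach =>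
    let rc := pvRound arr reach false
    if rc.2 then pvSat arr fuel rc.1 else reach

def canReach_approach4_optimized_early_termination_alt (arr : List Int) (start : Int) : Bool :=
  if arr = [] ∨ (arr.length : Int) ≤ start then false
  else
    match PySem.List.pyGet? arr start with
    | none => false  -- Python raises IndexError here (start < -len(arr)); outside Pre_
    | some a0 =>
      if a0 = 0 then true
      else
        let reach0 := [start + a0, start - a0].foldl
          (fun r p => if 0 ≤ p ∧ p < (arr.length : Int) then PySem.List.pySetD r p true else r)
          (List.replicate arr.length false)
        let reach := pvSat arr (arr.length + 1) reach0
        (PySem.List.pyRange 0 (arr.length : Int) 1).any (fun i =>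
          PySem.List.pyGetD reach i false &&
            match PySem.List.pyGet? arr i with
            | some a => decide (a = 0)
            | none => false)  -- unreachable: i ∈ range(len(arr))

-- ===== PRECONDITION & SPEC =====
-- Pre_ excludes exactly the inputs where Python A raises IndexError on arr[start]:
-- arr nonempty and start < -len(arr) (the 'start >= len(arr)' guard has already passed).
def Pre_canReach_approach4_optimized_early_termination (arr : List Int) (start : Int) : Prop :=
  arr = [] ∨ (arr.length : Int) ≤ start ∨ -(arr.length : Int) ≤ start
instance (arr : List Int) (start : Int) : Decidable (Pre_canReach_approach4_optimized_early_termination arr start) := by unfold Pre_canReach_approach4_optimized_early_termination; infer_instance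
def pvWitness_canReach_approach4_optimized_early_termination : List Int × Int := ([1, 0], 0)
def Spec_canReach_approach4_optimized_early_termination (arr : List Int) (start : Int) (out : Bool) : Prop := out = canReach_approach4_optimized_early_termination_alt arr start
instance (arr : List Int) (start : Int) (out : Bool) : Decidable (Spec_canReach_approach4_optimized_early_termination arr start out) := by unfold Spec_canReach_approach4_optimized_early_termination; infer_instance

-- ===== CLAIM (what is proved, stated in full; the proofs are below) =====
def Claim_equal_canReach_approach4_optimized_early_termination : Prop := ∀ (arr : List Int) (start : Int), Dom_canReach_approach4_optimized_early_termination arr start → Pre_canReach_approach4_optimized_early_termination arr start → Spec_canReach_approach4_optimized_early_termination arr start (canReach_approach4_optimized_early_termination arr start)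

-- ===== LEMMAS AND PROOFS =====

-- positions reachable by jumps after leaving `start` (whose cell holds a0 = arr[start])
inductive pvReach (arr : List Int) (start a0 : Int) : Nat → Prop
  | seed (p : Nat) (hp : p < arr.length)
      (h : (p : Int) = start + a0 ∨ (p : Int) = start - a0) : pvReach arr start a0 p
  | step (i j : Nat) (hi : i < arr.length) (hj : j < arr.length)
      (hR : pvReach arr start a0 i)
      (h : (j : Int) = (i : Int) + arr.getD i 0 ∨ (j : Int) = (i : Int) - arr.getD i 0) :
      pvReach arr start a0 j

-- "some reachable cell holds 0" — the common meaning of both loops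
def pvP (arr : List Int) (start a0 : Int) : Prop :=
  ∃ z : Nat, z < arr.length ∧ pvReach arr start a0 z ∧ arr.getD z 0 = 0

lemma pv_pyGet_nat (arr : List Int) (k : Nat) (hk : k < arr.length) :
    PySem.List.pyGet? arr (k : Int) = some (arr.getD k 0) := by
  rw [PySem.List.pyGet?_natCast]
  simp [List.getD_eq_getElem?_getD, hk]

lemma mem_pvZeroPositions (arr : List Int) (z : Int) :
    z ∈ pvZeroPositions arr ↔ ∃ k : Nat, k < arr.length ∧ z = (k : Int) ∧ arr.getD k 0 = 0 := by
  unfold pvZeroPositions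
  rw [PySem.List.foldl_ite_eq_foldl_filter (p := fun q => q.2 = 0)
      (f := fun (s : PySem.Set Int) (q : Int × Int) => PySem.Set.add s q.1)]
  rw [PySem.Set.mem_foldl_add (f := fun (q : Int × Int) => q.1)]
  simp only [PySem.Set.empty, List.not_mem_nil, false_or, List.mem_filter,
    PySem.List.mem_enumerate_iff]
  constructor
  · rintro ⟨b, ⟨⟨k, hk, rfl⟩, hz⟩, rfl⟩
    exact ⟨k, hk, by simp, by simp_all [List.getD_eq_getElem?_getD]⟩
  · rintro ⟨k, hk, rfl, h0⟩
    refine ⟨((k : Int), arr[k]), ⟨⟨k, hk, by simp⟩, ?_⟩, rfl⟩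
    simp_all [List.getD_eq_getElem?_getD]

lemma pv_nodup_length_le (arr : List Int) (start : Int) (visited : List Int)
    (hnd : visited.Nodup)
    (hsub : ∀ v ∈ visited, v = start ∨ ∃ k : Nat, k < arr.length ∧ v = (k : Int)) :
    visited.length ≤ arr.length + 1 := by
  have h : visited ⊆ start :: (List.range arr.length).map (fun k => (k : Int)) := by
    intro v hv
    rcases hsub v hv with h | ⟨k, hk, rfl⟩
    · simp [h]
    · simp only [List.mem_cons, List.mem_map]
      exact Or.inr ⟨k, by simpa using hk, rfl⟩
  have := List.Subperm.length_le (List.Nodup.subperm hnd h)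
  simpa using this

-- ===== A-side: BFS correctness =====

lemma pvTryNexts_none (arr : List Int) (zeros : PySem.Set Int) :
    ∀ (cands : List Int) (visited : PySem.Set Int) (queue : List Int),
    pvTryNexts arr zeros cands visited queue = none →
    ∃ p ∈ cands, 0 ≤ p ∧ p < (arr.length : Int) ∧ p ∈ zeros := by
  intro cands
  induction cands with
  | nil => intro v q h; simp [pvTryNexts] at h
  | cons p rest ih =>
    intro v q h
    rw [pvTryNexts] at h
    split at h
    · rename_i hc
      split at h
      · exact ⟨p, List.mem_cons_self, hc.1, hc.2.1, by assumption⟩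
      · obtain ⟨x, hx, h1, h2, h3⟩ := ih _ _ h
        exact ⟨x, List.mem_cons_of_mem _ hx, h1, h2, h3⟩
    · obtain ⟨x, hx, h1, h2, h3⟩ := ih _ _ h
      exact ⟨x, List.mem_cons_of_mem _ hx, h1, h2, h3⟩

lemma pvTryNexts_some (arr : List Int) (zeros : PySem.Set Int) :
    ∀ (cands : List Int) (visited : PySem.Set Int) (queue : List Int)
      (v' : PySem.Set Int) (q' : List Int),
    pvTryNexts arr zeros cands visited queue = some (v', q') →
    ∃ adds : List Int,
      v' = visited ++ adds ∧ q' = queue ++ adds ∧ adds.Nodup ∧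
      (∀ p ∈ adds, p ∈ cands ∧ 0 ≤ p ∧ p < (arr.length : Int) ∧ p ∉ visited ∧ p ∉ zeros) ∧
      (∀ p ∈ cands, 0 ≤ p → p < (arr.length : Int) → p ∈ visited ∨ p ∈ adds) := by
  intro cands
  induction cands with
  | nil =>
    intro v q v' q' h
    simp [pvTryNexts] at h
    exact ⟨[], by simp [h.1.symm], by simp [h.2.symm], by simp, by simp, by simp⟩
  | cons p rest ih =>
    intro v q v' q' h
    rw [pvTryNexts] at h
    split at h
    · rename_i hc
      obtain ⟨h0p, hpn, hpv⟩ := hc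
      split at h
      · exact absurd h (by simp)
      · rename_i hpz
        have hadd : PySem.Set.add v p = v ++ [p] := PySem.Set.add_of_not_mem hpv
        obtain ⟨adds, hv', hq', hnd, hall, hcov⟩ := ih _ _ _ _ h
        refine ⟨p :: adds, ?_, ?_, ?_, ?_, ?_⟩
        · rw [hv', hadd]; simp
        · rw [hq']; simp
        · refine List.nodup_cons.mpr ⟨?_, hnd⟩
          intro hmem
          have := (hall p hmem).2.2.2.1
          simp [hadd] at this
        · intro x hx
          rcases List.mem_cons.mp hx with rfl | hx'
          · exact ⟨List.mem_cons_self, h0p, hpn, hpv, hpz⟩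
          · obtain ⟨hxr, a1, a2, a3, a4⟩ := hall x hx'
            refine ⟨List.mem_cons_of_mem _ hxr, a1, a2, ?_, a4⟩
            simp [hadd] at a3
            exact a3.1
        · intro x hx hx0 hxn
          rcases List.mem_cons.mp hx with rfl | hx'
          · exact Or.inr List.mem_cons_self
          · rcases hcov x hx' hx0 hxn with hv | ha
            · rw [hadd] at hv
              rcases List.mem_append.mp hv with hv | hv
              · exact Or.inl hv
              · simp at hv; subst hv; exact Or.inr List.mem_cons_self
            · exact Or.inr (List.mem_cons_of_mem _ ha)
    · rename_i hc
      push Not at hc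
      obtain ⟨adds, hv', hq', hnd, hall, hcov⟩ := ih _ _ _ _ h
      refine ⟨adds, hv', hq', hnd, ?_, ?_⟩
      · intro x hx
        obtain ⟨hxr, a⟩ := hall x hx
        exact ⟨List.mem_cons_of_mem _ hxr, a⟩
      · intro x hx hx0 hxn
        rcases List.mem_cons.mp hx with rfl | hx'
        · exact Or.inl (hc hx0 hxn)
        · exact hcov x hx' hx0 hxn


-- the BFS loop invariant
def pvInv (arr : List Int) (start a0 : Int) (queue visited : List Int) : Prop :=
  visited.Nodup ∧ start ∈ visited ∧ queue ⊆ visited ∧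
  (∀ v ∈ visited, v = start ∨ ∃ k : Nat, k < arr.length ∧ v = (k : Int) ∧ pvReach arr start a0 k) ∧
  (∀ v ∈ visited, ∀ k : Nat, k < arr.length → v = (k : Int) → arr.getD k 0 ≠ 0) ∧
  (∀ v ∈ visited, v ∉ queue → ∀ a, PySem.List.pyGet? arr v = some a →
     ∀ q, (q = v + a ∨ q = v - a) → 0 ≤ q → q < (arr.length : Int) → q ∈ visited)

lemma pv_closed_no_reach (arr : List Int) (start a0 : Int)
    (hS : PySem.List.pyGet? arr start = some a0)
    (visited : List Int) (hInv : pvInv arr start a0 [] visited) :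
    ¬ pvP arr start a0 := by
  obtain ⟨hnd, hstart, hqv, hmem, hnz, hclosed⟩ := hInv
  have hall : ∀ k, pvReach arr start a0 k → (k : Int) ∈ visited := by
    intro k hk
    induction hk with
    | seed p hp h =>
      exact hclosed start hstart (by simp) a0 hS _ h (by positivity) (by exact_mod_cast hp)
    | step i j hi hj hR h ih =>
      exact hclosed _ ih (by simp) _ (pv_pyGet_nat arr i hi) _ h (by positivity)
        (by exact_mod_cast hj)
  rintro ⟨z, hz, hr, h0⟩
  exact hnz _ (hall z hr) z hz rfl h0

lemma pvBfs_spec (arr : List Int) (start a0 : Int)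
    (hS : PySem.List.pyGet? arr start = some a0) :
    ∀ (fuel : Nat) (queue visited : List Int),
    pvInv arr start a0 queue visited →
    queue.length + 2 * (arr.length + 1 - visited.length) ≤ fuel →
    (pvBfs arr (pvZeroPositions arr) fuel queue visited = true ↔ pvP arr start a0) := by
  intro fuel
  induction fuel with
  | zero =>
    intro queue visited hInv hm
    have hlen : visited.length ≤ arr.length + 1 :=
      pv_nodup_length_le arr start visited hInv.1
        (fun v hv => (hInv.2.2.2.1 v hv).imp id (fun ⟨k, hk, he, _⟩ => ⟨k, hk, he⟩))
    have hq : queue = [] := List.eq_nil_of_length_eq_zero (by omega)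
    subst hq
    simp only [pvBfs, Bool.false_eq_true, false_iff]
    exact pv_closed_no_reach arr start a0 hS visited hInv
  | succ fuel ih =>
    intro queue visited hInv hm
    match queue with
    | [] =>
      simp only [pvBfs, Bool.false_eq_true, false_iff]
      exact pv_closed_no_reach arr start a0 hS visited hInv
    | c :: qs =>
      obtain ⟨hnd, hstart, hqv, hmem, hnz, hclosed⟩ := hInv
      have hlen : visited.length ≤ arr.length + 1 :=
        pv_nodup_length_le arr start visited hnd
          (fun v hv => (hmem v hv).imp id (fun ⟨k, hk, he, _⟩ => ⟨k, hk, he⟩))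
      have hc : c ∈ visited := hqv List.mem_cons_self
      obtain ⟨a, ha, hcase⟩ :
          ∃ a, PySem.List.pyGet? arr c = some a ∧
            (c = start ∧ a = a0 ∨
              ∃ k : Nat, k < arr.length ∧ c = (k : Int) ∧ a = arr.getD k 0 ∧
                pvReach arr start a0 k) := by
        rcases hmem c hc with rfl | ⟨k, hk, rfl, hR⟩
        · exact ⟨a0, hS, Or.inl ⟨rfl, rfl⟩⟩
        · exact ⟨_, pv_pyGet_nat arr k hk, Or.inr ⟨k, hk, rfl, rfl, hR⟩⟩
      have hnb : ∀ q : Int, (q = c + a ∨ q = c - a) → 0 ≤ q → q < (arr.length : Int) →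
          q.toNat < arr.length ∧ (q.toNat : Int) = q ∧ pvReach arr start a0 q.toNat := by
        intro q hq hq0 hqn
        have htn : (q.toNat : Int) = q := Int.toNat_of_nonneg hq0
        have hlt : q.toNat < arr.length := by omega
        refine ⟨hlt, htn, ?_⟩
        rcases hcase with ⟨rfl, rfl⟩ | ⟨k, hk, rfl, rfl, hR⟩
        · exact pvReach.seed _ hlt (by rw [htn]; exact hq)
        · exact pvReach.step k _ hk hlt hR (by rw [htn]; exact hq)
      cases htr : pvTryNexts arr (pvZeroPositions arr) [c + a, c - a] visited qs with
      | none =>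
        simp only [pvBfs, ha, htr, true_iff]
        obtain ⟨p, hpmem, hp0, hpn, hpz⟩ := pvTryNexts_none arr _ _ _ _ htr
        obtain ⟨k, hk, rfl, h0⟩ := (mem_pvZeroPositions arr p).mp hpz
        have hq : ((k : Int) = c + a ∨ (k : Int) = c - a) := by simpa using hpmem
        obtain ⟨hlt, htn, hR⟩ := hnb _ hq hp0 hpn
        exact ⟨k, hk, by simpa using hR, h0⟩
      | some pr =>
        obtain ⟨v', q'⟩ := pr
        obtain ⟨adds, rfl, rfl, hnda, hall, hcov⟩ := pvTryNexts_some arr _ _ _ _ _ _ htr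
        simp only [pvBfs, ha, htr]
        have hdisj : visited.Disjoint adds := fun x hx hxa => (hall x hxa).2.2.2.1 hx
        have hnd' : (visited ++ adds).Nodup := List.Nodup.append hnd hnda hdisj
        have hmem' : ∀ v ∈ visited ++ adds, v = start ∨
            ∃ k : Nat, k < arr.length ∧ v = (k : Int) ∧ pvReach arr start a0 k := by
          intro v hv
          rcases List.mem_append.mp hv with hv | hv
          · exact hmem v hv
          · obtain ⟨hvc, hv0, hvn, _, _⟩ := hall v hv
            have hq : (v = c + a ∨ v = c - a) := by simpa using hvc
            obtain ⟨hlt, htn, hR⟩ := hnb v hq hv0 hvn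
            exact Or.inr ⟨v.toNat, hlt, htn.symm, hR⟩
        apply ih (qs ++ adds) (visited ++ adds)
        · refine ⟨hnd', List.mem_append.mpr (Or.inl hstart), ?_, hmem', ?_, ?_⟩
          · intro x hx
            rcases List.mem_append.mp hx with hx | hx
            · exact List.mem_append.mpr (Or.inl (hqv (List.mem_cons_of_mem _ hx)))
            · exact List.mem_append.mpr (Or.inr hx)
          · intro v hv k hk hvk h0
            rcases List.mem_append.mp hv with hv | hv
            · exact hnz v hv k hk hvk h0
            · exact (hall v hv).2.2.2.2 ((mem_pvZeroPositions arr v).mpr ⟨k, hk, hvk, h0⟩)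
          · intro v hv hvq a' ha' q hq hq0 hqn
            have hvq' : v ∉ qs ∧ v ∉ adds := by
              constructor <;> intro hx <;>
                exact hvq (List.mem_append.mpr (by first | exact Or.inl hx | exact Or.inr hx))
            rcases List.mem_append.mp hv with hv | hv
            · by_cases hvc : v = c
              · subst hvc
                have haa : a' = a := by rw [ha] at ha'; exact (Option.some_inj.mp ha').symm
                subst haa
                have : q ∈ ([v + a', v - a'] : List Int) := by
                  rcases hq with rfl | rfl <;> simp
                rcases hcov q this hq0 hqn with hqv' | hqa
                · exact List.mem_append.mpr (Or.inl hqv')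
                · exact List.mem_append.mpr (Or.inr hqa)
              · have : v ∉ c :: qs := by
                  intro hx
                  rcases List.mem_cons.mp hx with rfl | hx
                  · exact hvc rfl
                  · exact hvq'.1 hx
                exact List.mem_append.mpr
                  (Or.inl (hclosed v hv this a' ha' q hq hq0 hqn))
            · exact absurd (List.mem_append.mpr (Or.inr hv)) hvq
        · have hlen' : (visited ++ adds).length ≤ arr.length + 1 :=
            pv_nodup_length_le arr start _ hnd'
              (fun v hv => (hmem' v hv).imp id (fun ⟨k, hk, he, _⟩ => ⟨k, hk, he⟩))
          simp only [List.length_append, List.length_cons] at *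
          omega

-- ===== B-side: saturation correctness =====

lemma pv_foldl_pres {α σ : Type} (f : σ → α → σ) (P : σ → Prop)
    (h : ∀ s a, P s → P (f s a)) : ∀ (l : List α) (s : σ), P s → P (l.foldl f s) := by
  intro l
  induction l with
  | nil => intro s hs; exact hs
  | cons x xs ih => intro s hs; exact ih _ (h s x hs)

lemma pv_pyGetD_toNat (r : List Bool) (j : Int) (h0 : 0 ≤ j) :
    PySem.List.pyGetD r j false = r.getD j.toNat false := by
  have h := PySem.List.pyGetD_natCast r j.toNat false
  rw [Int.toNat_of_nonneg h0] at h
  exact h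

lemma pv_getD_true_lt (r : List Bool) (k : Nat) (h : r.getD k false = true) :
    k < r.length := by
  by_contra hk
  rw [List.getD_eq_getElem?_getD, List.getElem?_eq_none (by omega)] at h
  simp at h

lemma pv_getD_set (r : List Bool) (j k : Nat) (b : Bool) (hj : j < r.length) :
    (r.set j b).getD k false = if k = j then b else r.getD k false := by
  simp only [List.getD_eq_getElem?_getD, List.getElem?_set]
  split
  · rename_i h; subst h; simp
  · rename_i h
    rw [if_neg (fun he => h he.symm)]

lemma pv_count_set_true (r : List Bool) (j : Nat) (hj : j < r.length)
    (h : r.getD j false = false) :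
    (r.set j true).count true = r.count true + 1 := by
  induction r generalizing j with
  | nil => simp at hj
  | cons x xs ih =>
    cases j with
    | zero =>
      simp only [List.getD_eq_getElem?_getD] at h
      simp at h
      simp [List.set, h]
    | succ j =>
      have hj' : j < xs.length := by simpa using hj
      have h' : xs.getD j false = false := by
        simpa [List.getD_eq_getElem?_getD] using h
      simp [List.set, List.count_cons, ih j hj' h']
      omega

-- invariant carried through one relaxation round: lengths, soundness w.r.t. pvReach,
-- and the count of set cells against the count c0 at the start of the round
def pvBInv (arr : List Int) (start a0 : Int) (c0 : Nat) (rc : List Bool × Bool) : Prop :=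
  rc.1.length = arr.length ∧
  (∀ k : Nat, rc.1.getD k false = true → pvReach arr start a0 k) ∧
  c0 ≤ rc.1.count true ∧ (rc.2 = true → c0 < rc.1.count true)

lemma pv_relax_inv (arr : List Int) (start a0 : Int) (c0 : Nat)
    (rc : List Bool × Bool) (j : Int)
    (hinv : pvBInv arr start a0 c0 rc)
    (hj : 0 ≤ j → j < (arr.length : Int) → pvReach arr start a0 j.toNat) :
    pvBInv arr start a0 c0 (pvRelax arr rc j) := by
  obtain ⟨hlen, hgood, hc1, hc2⟩ := hinv
  unfold pvRelax
  split
  · rename_i hc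
    obtain ⟨hj0, hjn, hjf⟩ := hc
    rw [pv_pyGetD_toNat _ _ hj0] at hjf
    have hjlt : j.toNat < rc.1.length := by rw [hlen]; omega
    rw [PySem.List.pySetD_of_nonneg rc.1 true hj0]
    have hcnt := pv_count_set_true rc.1 j.toNat hjlt hjf
    refine ⟨by simpa using hlen, ?_, by simp [hcnt]; omega, by intro _; simp [hcnt]; omega⟩
    intro k hk
    rw [pv_getD_set _ _ _ _ hjlt] at hk
    split at hk
    · rename_i he; subst he; exact hj hj0 hjn
    · exact hgood k hk
  · exact ⟨hlen, hgood, hc1, hc2⟩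

lemma pv_body_inv (arr : List Int) (start a0 : Int) (c0 : Nat)
    (rc : List Bool × Bool) (i : Int) (hi0 : 0 ≤ i)
    (hinv : pvBInv arr start a0 c0 rc) :
    pvBInv arr start a0 c0 (pvRoundBody arr rc i) := by
  unfold pvRoundBody
  split
  · rename_i htrue
    rw [pv_pyGetD_toNat _ _ hi0] at htrue
    have hR : pvReach arr start a0 i.toNat := hinv.2.1 _ htrue
    have hilt : i.toNat < arr.length := by
      have h1 := pv_getD_true_lt _ _ htrue
      have h2 := hinv.1
      omega
    have ha : PySem.List.pyGet? arr i = some (arr.getD i.toNat 0) := by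
      have h := pv_pyGet_nat arr i.toNat hilt
      rwa [Int.toNat_of_nonneg hi0] at h
    rw [ha]
    have hstep : ∀ j : Int, (j = i + arr.getD i.toNat 0 ∨ j = i - arr.getD i.toNat 0) →
        0 ≤ j → j < (arr.length : Int) → pvReach arr start a0 j.toNat := by
      intro j hj hj0 hjn
      refine pvReach.step i.toNat j.toNat hilt (by omega) hR ?_
      rw [Int.toNat_of_nonneg hj0, Int.toNat_of_nonneg hi0]
      exact hj
    show pvBInv arr start a0 c0 (pvRelax arr (pvRelax arr rc (i + arr.getD i.toNat 0)) (i - arr.getD i.toNat 0))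
    exact pv_relax_inv _ _ _ _ _ _
      (pv_relax_inv _ _ _ _ _ _ hinv (fun h0 hn => hstep _ (Or.inl rfl) h0 hn))
      (fun h0 hn => hstep _ (Or.inr rfl) h0 hn)
  · exact hinv


lemma pv_fold_inv_mem (arr : List Int) (start a0 : Int) (c0 : Nat) :
    ∀ (l : List Int), (∀ x ∈ l, 0 ≤ x) → ∀ (rc : List Bool × Bool),
    pvBInv arr start a0 c0 rc → pvBInv arr start a0 c0 (l.foldl (pvRoundBody arr) rc) := by
  intro l
  induction l with
  | nil => intro _ rc h; exact h
  | cons i l ih =>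
    intro hpos rc h
    simp only [List.foldl_cons]
    exact ih (fun x hx => hpos x (List.mem_cons_of_mem _ hx)) _
      (pv_body_inv arr start a0 c0 rc i (hpos i List.mem_cons_self) h)

lemma pv_round_inv (arr : List Int) (start a0 : Int) (reach : List Bool)
    (hlen : reach.length = arr.length)
    (hgood : ∀ k : Nat, reach.getD k false = true → pvReach arr start a0 k) :
    pvBInv arr start a0 (reach.count true) (pvRound arr reach false) := by
  unfold pvRound
  refine pv_fold_inv_mem arr start a0 _ _ ?_ _ ⟨hlen, hgood, le_refl _, by simp⟩
  intro x hx
  exact ((PySem.List.mem_pyRange_one).mp hx).1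

-- "stays set" predicate preserved by everything in a round
lemma pv_relax_keep (arr : List Int) (k : Nat) (rc : List Bool × Bool) (j : Int)
    (hlen : rc.1.length = arr.length) (hk : rc.1.getD k false = true) :
    (pvRelax arr rc j).1.length = arr.length ∧ (pvRelax arr rc j).1.getD k false = true := by
  unfold pvRelax
  split
  · rename_i hc
    obtain ⟨hj0, hjn, _⟩ := hc
    rw [PySem.List.pySetD_of_nonneg rc.1 true hj0]
    have hjlt : j.toNat < rc.1.length := by omega
    rw [pv_getD_set _ _ _ _ hjlt]
    refine ⟨by simpa using hlen, ?_⟩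
    split
    · rfl
    · simpa [List.getD_eq_getElem?_getD] using hk
  · exact ⟨hlen, hk⟩

lemma pv_body_keep (arr : List Int) (k : Nat) (rc : List Bool × Bool) (i : Int)
    (h : rc.1.length = arr.length ∧ rc.1.getD k false = true) :
    (pvRoundBody arr rc i).1.length = arr.length ∧
      (pvRoundBody arr rc i).1.getD k false = true := by
  unfold pvRoundBody
  split
  · cases hg : PySem.List.pyGet? arr i with
    | none => exact h
    | some a =>
      show (pvRelax arr (pvRelax arr rc (i + a)) (i - a)).1.length = arr.length ∧ _
      have h1 := pv_relax_keep arr k rc (i + a) h.1 h.2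
      exact pv_relax_keep arr k _ (i - a) h1.1 h1.2
  · exact h

lemma pv_round_keep (arr : List Int) (k : Nat) (reach : List Bool) (b : Bool)
    (hlen : reach.length = arr.length) (hk : reach.getD k false = true) :
    (pvRound arr reach b).1.length = arr.length ∧
      (pvRound arr reach b).1.getD k false = true := by
  unfold pvRound
  exact pv_foldl_pres (pvRoundBody arr)
    (fun rc => rc.1.length = arr.length ∧ rc.1.getD k false = true)
    (fun rc i h => pv_body_keep arr k rc i h) _ (reach, b) ⟨hlen, hk⟩

lemma pv_round_len (arr : List Int) (reach : List Bool) (b : Bool)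
    (hlen : reach.length = arr.length) :
    (pvRound arr reach b).1.length = arr.length := by
  unfold pvRound
  refine pv_foldl_pres (pvRoundBody arr) (fun rc => rc.1.length = arr.length)
    ?_ _ (reach, b) hlen
  intro rc i h
  unfold pvRoundBody
  split
  · cases hg : PySem.List.pyGet? arr i with
    | none => exact h
    | some a =>
      show (pvRelax arr (pvRelax arr rc (i + a)) (i - a)).1.length = arr.length
      have hstep : ∀ (rc' : List Bool × Bool) (j : Int), rc'.1.length = arr.length →
          (pvRelax arr rc' j).1.length = arr.length := by
        intro rc' j hl
        unfold pvRelax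
        split
        · simpa using hl
        · exact hl
      exact hstep _ _ (hstep _ _ h)
  · exact h

lemma pv_relax_changed (arr : List Int) (rc : List Bool × Bool) (j : Int)
    (h : rc.2 = true) : (pvRelax arr rc j).2 = true := by
  unfold pvRelax; split <;> simp [h]

lemma pv_body_changed (arr : List Int) (rc : List Bool × Bool) (i : Int)
    (h : rc.2 = true) : (pvRoundBody arr rc i).2 = true := by
  unfold pvRoundBody
  split
  · cases hg : PySem.List.pyGet? arr i with
    | none => exact h
    | some a =>
      show (pvRelax arr (pvRelax arr rc (i + a)) (i - a)).2 = true
      exact pv_relax_changed arr _ _ (pv_relax_changed arr _ _ h)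
  · exact h

lemma pv_fold_changed (arr : List Int) (l : List Int) (rc : List Bool × Bool)
    (h : rc.2 = true) : (l.foldl (pvRoundBody arr) rc).2 = true :=
  pv_foldl_pres (pvRoundBody arr) (fun rc => rc.2 = true)
    (fun rc i hh => pv_body_changed arr rc i hh) l rc h

lemma pv_relax_false (arr : List Int) (rc : List Bool × Bool) (j : Int)
    (h : (pvRelax arr rc j).2 = false) :
    pvRelax arr rc j = rc ∧ rc.2 = false ∧
      (0 ≤ j → j < (arr.length : Int) → PySem.List.pyGetD rc.1 j false = true) := by
  unfold pvRelax at h ⊢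
  split at h
  · simp at h
  · rename_i hc
    push Not at hc
    rw [if_neg (by push Not; exact hc)]
    refine ⟨rfl, h, ?_⟩
    intro hj0 hjn
    have := hc hj0 hjn
    simpa using this

-- closedness at index i extracted from a no-change round
def pvClosedAt (arr : List Int) (rc : List Bool × Bool) (i : Int) : Prop :=
  ∀ a, PySem.List.pyGet? arr i = some a → PySem.List.pyGetD rc.1 i false = true →
    ∀ j, (j = i + a ∨ j = i - a) → 0 ≤ j → j < (arr.length : Int) →
      PySem.List.pyGetD rc.1 j false = true

lemma pv_body_false (arr : List Int) (rc : List Bool × Bool) (i : Int)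
    (h : (pvRoundBody arr rc i).2 = false) :
    pvRoundBody arr rc i = rc ∧ rc.2 = false ∧ pvClosedAt arr rc i := by
  by_cases htrue : PySem.List.pyGetD rc.1 i false = true
  · cases hg : PySem.List.pyGet? arr i with
    | none =>
      have he : pvRoundBody arr rc i = rc := by
        unfold pvRoundBody; rw [if_pos htrue, hg]
      rw [he] at h
      exact ⟨he, h, fun a ha => by rw [hg] at ha; cases ha⟩
    | some a =>
      have he : pvRoundBody arr rc i = pvRelax arr (pvRelax arr rc (i + a)) (i - a) := by
        unfold pvRoundBody; rw [if_pos htrue, hg]; rfl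
      rw [he] at h
      obtain ⟨he2, hf2, hc2⟩ := pv_relax_false arr _ _ h
      obtain ⟨he1, hf1, hc1⟩ := pv_relax_false arr _ _ hf2
      refine ⟨by rw [he, he2, he1], hf1, ?_⟩
      intro a' ha' _ j hj hj0 hjn
      have haa : a' = a := by rw [hg] at ha'; exact (Option.some_inj.mp ha').symm
      subst haa
      rcases hj with rfl | rfl
      · exact hc1 hj0 hjn
      · have := hc2 hj0 hjn
        rw [he1] at this
        exact this
  · have he : pvRoundBody arr rc i = rc := by
      unfold pvRoundBody; rw [if_neg htrue]
    rw [he] at h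
    exact ⟨he, h, fun a ha htr => absurd htr htrue⟩

lemma pv_fold_false (arr : List Int) :
    ∀ (l : List Int) (rc : List Bool × Bool),
    (l.foldl (pvRoundBody arr) rc).2 = false →
    l.foldl (pvRoundBody arr) rc = rc ∧ rc.2 = false ∧ ∀ i ∈ l, pvClosedAt arr rc i := by
  intro l
  induction l with
  | nil => intro rc h; exact ⟨rfl, h, by simp⟩
  | cons i l ih =>
    intro rc h
    simp only [List.foldl_cons] at h ⊢
    have hb : (pvRoundBody arr rc i).2 = false := by
      by_contra hb
      have := pv_fold_changed arr l _ (by simpa using hb)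
      rw [this] at h; cases h
    obtain ⟨he, hf, hcl⟩ := pv_body_false arr rc i hb
    rw [he] at h ⊢
    obtain ⟨he', _, hcl'⟩ := ih rc h
    refine ⟨he', hf, ?_⟩
    intro x hx
    rcases List.mem_cons.mp hx with rfl | hx
    · exact hcl
    · exact hcl' x hx


lemma pv_sat_keep (arr : List Int) (k : Nat) : ∀ (fuel : Nat) (reach : List Bool),
    reach.length = arr.length → reach.getD k false = true →
    (pvSat arr fuel reach).getD k false = true := by
  intro fuel
  induction fuel with
  | zero => intro reach _ h; exact h
  | succ fuel ih =>
    intro reach hlen h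
    have he : pvSat arr (fuel + 1) reach =
        if (pvRound arr reach false).2 then pvSat arr fuel (pvRound arr reach false).1
        else reach := rfl
    rw [he]
    by_cases hch : (pvRound arr reach false).2
    · rw [if_pos hch]
      obtain ⟨hl, hk⟩ := pv_round_keep arr k reach false hlen h
      exact ih _ hl hk
    · rw [if_neg hch]; exact h

lemma pv_sat_len (arr : List Int) : ∀ (fuel : Nat) (reach : List Bool),
    reach.length = arr.length → (pvSat arr fuel reach).length = arr.length := by
  intro fuel
  induction fuel with
  | zero => intro reach h; exact h
  | succ fuel ih =>
    intro reach hlen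
    have he : pvSat arr (fuel + 1) reach =
        if (pvRound arr reach false).2 then pvSat arr fuel (pvRound arr reach false).1
        else reach := rfl
    rw [he]
    by_cases hch : (pvRound arr reach false).2
    · rw [if_pos hch]; exact ih _ (pv_round_len arr reach false hlen)
    · rw [if_neg hch]; exact hlen

lemma pv_sat_good (arr : List Int) (start a0 : Int) : ∀ (fuel : Nat) (reach : List Bool),
    reach.length = arr.length →
    (∀ k : Nat, reach.getD k false = true → pvReach arr start a0 k) →
    ∀ k : Nat, (pvSat arr fuel reach).getD k false = true → pvReach arr start a0 k := by
  intro fuel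
  induction fuel with
  | zero => intro reach _ hg; exact hg
  | succ fuel ih =>
    intro reach hlen hg
    have he : pvSat arr (fuel + 1) reach =
        if (pvRound arr reach false).2 then pvSat arr fuel (pvRound arr reach false).1
        else reach := rfl
    rw [he]
    by_cases hch : (pvRound arr reach false).2
    · rw [if_pos hch]
      have hinv := pv_round_inv arr start a0 reach hlen hg
      exact ih _ hinv.1 hinv.2.1
    · rw [if_neg hch]; exact hg

lemma pv_sat_fix (arr : List Int) (start a0 : Int) : ∀ (fuel : Nat) (reach : List Bool),
    reach.length = arr.length →
    (∀ k : Nat, reach.getD k false = true → pvReach arr start a0 k) →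
    arr.length < reach.count true + fuel →
    (pvRound arr (pvSat arr fuel reach) false).2 = false := by
  intro fuel
  induction fuel with
  | zero =>
    intro reach hlen _ hcnt
    have hc : reach.count true ≤ reach.length := List.count_le_length
    omega
  | succ fuel ih =>
    intro reach hlen hg hcnt
    have he : pvSat arr (fuel + 1) reach =
        if (pvRound arr reach false).2 then pvSat arr fuel (pvRound arr reach false).1
        else reach := rfl
    rw [he]
    by_cases hch : (pvRound arr reach false).2
    · rw [if_pos hch]
      have hinv := pv_round_inv arr start a0 reach hlen hg
      have hlt := hinv.2.2.2 hch
      exact ih _ hinv.1 hinv.2.1 (by omega)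
    · rw [if_neg hch]; simpa using hch

-- the seed table built by B before the loop
def pvReach0 (arr : List Int) (start a0 : Int) : List Bool :=
  [start + a0, start - a0].foldl
    (fun r p => if 0 ≤ p ∧ p < (arr.length : Int) then PySem.List.pySetD r p true else r)
    (List.replicate arr.length false)

lemma pv_getD_replicate (n k : Nat) : (List.replicate n false).getD k false = false := by
  rw [List.getD_eq_getElem?_getD, List.getElem?_replicate]
  split <;> rfl

lemma pv_seed_step_len (arr : List Int) (r : List Bool) (p : Int) :
    (if 0 ≤ p ∧ p < (arr.length : Int) then PySem.List.pySetD r p true else r).length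
      = r.length := by
  split
  · exact PySem.List.length_pySetD r p true
  · rfl

lemma pv_seed_step_getD (arr : List Int) (r : List Bool) (p : Int)
    (hlen : r.length = arr.length) (k : Nat) :
    ((if 0 ≤ p ∧ p < (arr.length : Int) then PySem.List.pySetD r p true else r).getD k false
      = true) ↔ (r.getD k false = true ∨ ((k : Int) = p ∧ k < arr.length)) := by
  split
  · rename_i hc
    obtain ⟨h0, hn⟩ := hc
    rw [PySem.List.pySetD_of_nonneg r true h0]
    rw [pv_getD_set r p.toNat k true (by omega)]
    constructor
    · intro h
      split at h
      · rename_i he; subst he; right; constructor <;> omega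
      · exact Or.inl h
    · intro h
      rcases h with h | ⟨he, hk⟩
      · split
        · rfl
        · exact h
      · rw [if_pos (by omega)]
  · rename_i hc
    push Not at hc
    constructor
    · exact Or.inl
    · intro h
      rcases h with h | ⟨he, hk⟩
      · exact h
      · exfalso
        have h0 : (0 : Int) ≤ p := by omega
        have := hc h0
        omega

lemma pv_reach0_len (arr : List Int) (start a0 : Int) :
    (pvReach0 arr start a0).length = arr.length := by
  unfold pvReach0
  simp only [List.foldl]
  rw [pv_seed_step_len, pv_seed_step_len, List.length_replicate]

lemma pv_reach0_getD (arr : List Int) (start a0 : Int) (k : Nat) :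
    (pvReach0 arr start a0).getD k false = true ↔
      k < arr.length ∧ ((k : Int) = start + a0 ∨ (k : Int) = start - a0) := by
  unfold pvReach0
  simp only [List.foldl]
  rw [pv_seed_step_getD arr _ (start - a0)
      (by rw [pv_seed_step_len, List.length_replicate]),
    pv_seed_step_getD arr _ (start + a0) (by rw [List.length_replicate]),
    pv_getD_replicate]
  constructor
  · rintro ((h | ⟨he, hk⟩) | ⟨he, hk⟩)
    · cases h
    · exact ⟨hk, Or.inl he⟩
    · exact ⟨hk, Or.inr he⟩
  · rintro ⟨hk, he | he⟩
    · exact Or.inl (Or.inr ⟨he, hk⟩)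
    · exact Or.inr ⟨he, hk⟩

lemma pv_reach0_good (arr : List Int) (start a0 : Int) :
    ∀ k : Nat, (pvReach0 arr start a0).getD k false = true → pvReach arr start a0 k := by
  intro k hk
  obtain ⟨hlt, h⟩ := (pv_reach0_getD arr start a0 k).mp hk
  exact pvReach.seed k hlt h

lemma pv_sat_complete (arr : List Int) (start a0 : Int) :
    ∀ k : Nat, pvReach arr start a0 k →
      (pvSat arr (arr.length + 1) (pvReach0 arr start a0)).getD k false = true := by
  have hlen0 := pv_reach0_len arr start a0
  have hlenF := pv_sat_len arr (arr.length + 1) _ hlen0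
  have hfix := pv_sat_fix arr start a0 (arr.length + 1) _ hlen0
    (pv_reach0_good arr start a0) (by omega)
  have hclosed := pv_fold_false arr _ _ hfix
  intro k hk
  induction hk with
  | seed p hp h =>
    exact pv_sat_keep arr p _ _ hlen0 ((pv_reach0_getD arr start a0 p).mpr ⟨hp, h⟩)
  | step i j hi hj hR h ih =>
    have hiI : ((i : Int)) ∈ PySem.List.pyRange 0 (arr.length : Int) 1 :=
      PySem.List.mem_pyRange_one.mpr ⟨by positivity, by exact_mod_cast hi⟩
    have hcl := hclosed.2.2 _ hiI
    have hji := hcl (arr.getD i 0) (pv_pyGet_nat arr i hi)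
      (by rw [pv_pyGetD_toNat _ _ (by positivity)]; simpa using ih)
      (j : Int) (by exact_mod_cast h) (by positivity) (by exact_mod_cast hj)
    rw [pv_pyGetD_toNat _ _ (by positivity)] at hji
    simpa using hji


-- ===== assembling both ports against pvP =====

lemma pvAlt_iff (arr : List Int) (start a0 : Int)
    (hne : ¬(arr = [] ∨ (arr.length : Int) ≤ start))
    (hS : PySem.List.pyGet? arr start = some a0) (ha0 : ¬ a0 = 0) :
    (canReach_approach4_optimized_early_termination_alt arr start = true ↔
      pvP arr start a0) := by
  have he : canReach_approach4_optimized_early_termination_alt arr start =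
      (PySem.List.pyRange 0 (arr.length : Int) 1).any (fun i =>
        PySem.List.pyGetD (pvSat arr (arr.length + 1) (pvReach0 arr start a0)) i false &&
          match PySem.List.pyGet? arr i with
          | some a => decide (a = 0)
          | none => false) := by
    unfold canReach_approach4_optimized_early_termination_alt
    rw [if_neg hne]
    simp only [hS]
    rw [if_neg ha0]
    unfold pvReach0
    rfl
  rw [he, List.any_eq_true]
  have hlen0 := pv_reach0_len arr start a0
  constructor
  · rintro ⟨x, hx, hp⟩
    obtain ⟨hx0, hxn⟩ := PySem.List.mem_pyRange_one.mp hx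
    have hxlt : x.toNat < arr.length := by omega
    have hg : PySem.List.pyGet? arr x = some (arr.getD x.toNat 0) := by
      have h := pv_pyGet_nat arr x.toNat hxlt
      rwa [Int.toNat_of_nonneg hx0] at h
    rw [hg] at hp
    rw [Bool.and_eq_true] at hp
    obtain ⟨hr, h0⟩ := hp
    rw [pv_pyGetD_toNat _ _ hx0] at hr
    refine ⟨x.toNat, hxlt, ?_, by simpa using h0⟩
    exact pv_sat_good arr start a0 _ _ hlen0 (pv_reach0_good arr start a0) _ hr
  · rintro ⟨z, hz, hR, h0⟩
    refine ⟨(z : Int), PySem.List.mem_pyRange_one.mpr ⟨by positivity, by exact_mod_cast hz⟩, ?_⟩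
    rw [pv_pyGet_nat arr z hz]
    rw [Bool.and_eq_true]
    constructor
    · rw [pv_pyGetD_toNat _ _ (by positivity)]
      simpa using pv_sat_complete arr start a0 z hR
    · simpa using h0

lemma pvA_iff (arr : List Int) (start a0 : Int)
    (hne : ¬(arr = [] ∨ (arr.length : Int) ≤ start))
    (hS : PySem.List.pyGet? arr start = some a0) (ha0 : ¬ a0 = 0) :
    (canReach_approach4_optimized_early_termination arr start = true ↔
      pvP arr start a0) := by
  have he : canReach_approach4_optimized_early_termination arr start =
      (if pvZeroPositions arr = [] then false
       else pvBfs arr (pvZeroPositions arr) (2 * arr.length + 3) [start]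
         (PySem.Set.ofList [start])) := by
    unfold canReach_approach4_optimized_early_termination
    rw [if_neg hne]
    simp only [hS]
    rw [if_neg ha0]
  rw [he]
  by_cases hz : pvZeroPositions arr = []
  · rw [if_pos hz]
    simp only [Bool.false_eq_true, false_iff]
    rintro ⟨z, hzlt, _, h0⟩
    have : (z : Int) ∈ pvZeroPositions arr :=
      (mem_pvZeroPositions arr _).mpr ⟨z, hzlt, rfl, h0⟩
    rw [hz] at this
    cases this
  · rw [if_neg hz]
    have hof : PySem.Set.ofList [start] = [start] := by
      apply PySem.Set.ofList_eq_self_of_nodup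
      simp
    rw [hof]
    apply pvBfs_spec arr start a0 hS
    · refine ⟨by simp, by simp, by simp, ?_, ?_, ?_⟩
      · intro v hv
        rw [List.mem_singleton] at hv
        exact Or.inl hv
      · intro v hv k hk hvk h0
        rw [List.mem_singleton] at hv
        subst hv
        rw [hvk] at hS
        rw [pv_pyGet_nat arr k hk] at hS
        exact ha0 (by rw [← Option.some_inj.mp hS]; exact h0)
      · intro v hv hnv
        rw [List.mem_singleton] at hv
        exact absurd (by simp [hv]) hnv
    · simp only [List.length_cons, List.length_nil]
      omega

-- ===== VERDICT (by name: the statement is the Claim_ definition above) =====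
theorem canReach_approach4_optimized_early_termination_spec : Claim_equal_canReach_approach4_optimized_early_termination := by
  unfold Claim_equal_canReach_approach4_optimized_early_termination
  intro arr start _hdom _hpre
  unfold Spec_canReach_approach4_optimized_early_termination
  by_cases h1 : arr = [] ∨ (arr.length : Int) ≤ start
  · unfold canReach_approach4_optimized_early_termination
      canReach_approach4_optimized_early_termination_alt
    rw [if_pos h1, if_pos h1]
  · cases hS : PySem.List.pyGet? arr start with
    | none =>
      unfold canReach_approach4_optimized_early_termination
        canReach_approach4_optimized_early_termination_alt
      rw [if_neg h1, if_neg h1]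
      simp only [hS]
    | some a0 =>
      by_cases ha0 : a0 = 0
      · unfold canReach_approach4_optimized_early_termination
          canReach_approach4_optimized_early_termination_alt
        rw [if_neg h1, if_neg h1]
        simp only [hS]
        rw [if_pos ha0, if_pos ha0]
      · rw [Bool.eq_iff_iff, pvA_iff arr start a0 h1 hS ha0,
          pvAlt_iff arr start a0 h1 hS ha0]
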